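-- pv_equiv track=rewrite | github.com/schrodinger/pymol-open-source | trunk/pymol/modules/pmg_tk/skins/normal/__init__.py | split_tk_file_list
-- ===== SOURCE A (Python) =====
-- def split_tk_file_list(pattern):
--     filenames = []
--     while True:
--         pattern = pattern.strip()
--         if not pattern:
--             break
--         sep = None
--         if pattern[0] == '{':
--             pattern = pattern[1:]
--             sep = '}'
--         a = pattern.split(sep, 1)
--         filenames.append(a[0])
--         pattern = a[1] if len(a) == 2 else ''
--     return filenames
-- ===== SOURCE B (Python) =====
-- def split_tk_file_list(pattern):
--     # Single-pass cursor scanner over the string; trailing whitespace can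
--     # never be part of a token, so it is dropped once up front.
--     p = pattern.rstrip()
--     n = len(p)
--     filenames = []
--     i = 0
--     while i < n:
--         if p[i].isspace():
--             i += 1
--             continue
--         if p[i] == '{':
--             i += 1
--             j = i
--             while j < n and p[j] != '}':
--                 j += 1
--             if j == n:
--                 filenames.append(p[i:])
--                 break
--             filenames.append(p[i:j])
--             i = j + 1
--         else:
--             j = i
--             while j < n and not p[j].isspace():
--                 j += 1
--             filenames.append(p[i:j])
--             i = j
--     return filenames
-- ===== Notes on version B (the rewrite author's own statement) =====
-- stated objective: alternative
-- what changed: Replaces A's loop that re-strips and re-splits (re-slicing) the whole remaining string on every iteration by a single left-to-right cursor scan that extracts each token in place after one initial rstrip.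
import Mathlib
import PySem

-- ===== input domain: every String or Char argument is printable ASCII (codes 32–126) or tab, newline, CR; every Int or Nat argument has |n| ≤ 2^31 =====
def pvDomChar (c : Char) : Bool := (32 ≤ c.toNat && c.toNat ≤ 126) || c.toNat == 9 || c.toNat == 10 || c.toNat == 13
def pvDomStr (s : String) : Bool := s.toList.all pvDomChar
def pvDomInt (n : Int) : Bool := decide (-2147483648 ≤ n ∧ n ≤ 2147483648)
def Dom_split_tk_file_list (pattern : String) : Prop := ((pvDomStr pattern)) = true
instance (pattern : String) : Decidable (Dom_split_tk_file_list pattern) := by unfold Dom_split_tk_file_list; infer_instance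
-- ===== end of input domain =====

-- B replaces A's strip-and-split-again re-slicing loop by one left-to-right cursor scan
-- over the string (after a single initial rstrip): a different decomposition of the same parse.

-- Support lemmas cited by the ports' decreasing_by (they mention no port).

theorem pv_go0 (sep : List Char) (fuel : Nat) (l cur : List Char) (acc : List (List Char)) :
    PySem.Chars.splitOnMax.go sep fuel 0 l cur acc = ((cur.reverse ++ l) :: acc).reverse := by
  cases fuel <;> cases l <;> simp [PySem.Chars.splitOnMax.go]

theorem pv_go1 (l : List Char) : ∀ (fuel : Nat) (cur : List Char) (acc : List (List Char)),
    l.length < fuel →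
    PySem.Chars.splitOnMax.go ['}'] fuel 1 l cur acc =
      acc.reverse ++ (if l.dropWhile (fun c => c != '}') = [] then [cur.reverse ++ l]
        else [cur.reverse ++ l.takeWhile (fun c => c != '}'), (l.dropWhile (fun c => c != '}')).tail]) := by
  induction l with
  | nil =>
    intro fuel cur acc hf
    cases fuel with
    | zero => omega
    | succ f => simp [PySem.Chars.splitOnMax.go]
  | cons c rest ih =>
    intro fuel cur acc hf
    cases fuel with
    | zero => omega
    | succ f =>
      by_cases hc : c = '}'
      · subst hc
        simp [PySem.Chars.splitOnMax.go, List.isPrefixOf, pv_go0]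
      · have hpre : List.isPrefixOf ['}'] (c :: rest) = false := by
          simp [List.isPrefixOf]; exact fun h => absurd h.symm hc
        have hlen : rest.length < f := by simpa using Nat.lt_of_succ_lt_succ hf
        simp only [PySem.Chars.splitOnMax.go, hpre, if_neg (by omega : ¬(1 : Nat) = 0)]
        rw [ih f (c :: cur) acc hlen]
        have hne : (c != '}') = true := by simpa using hc
        by_cases hd : rest.dropWhile (fun c => c != '}') = [] <;>
          simp [hd, hne]

theorem pv_splitOnMax_one (u : List Char) :
    PySem.Chars.splitOnMax u ['}'] 1 =
      if u.dropWhile (fun c => c != '}') = [] then [u]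
      else [u.takeWhile (fun c => c != '}'), (u.dropWhile (fun c => c != '}')).tail] := by
  unfold PySem.Chars.splitOnMax
  rw [if_neg (by omega : ¬(1:Int) < 0)]
  rw [show Int.toNat 1 = 1 from rfl]
  rw [pv_go1 u (u.length + 1) [] [] (by omega)]
  by_cases hd : u.dropWhile (fun c => c != '}') = [] <;> simp [hd]

theorem pv_head_not_space (p : List Char) (hl : p.dropWhile PySem.Chars.isspace = p)
    (hp : p ≠ []) : ∀ c ∈ p.head?, PySem.Chars.isspace c = false := by
  obtain ⟨c, t, rfl⟩ := List.exists_cons_of_ne_nil hp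
  have hc : PySem.Chars.isspace c = false := by
    cases h : PySem.Chars.isspace c with
    | false => rfl
    | true =>
      rw [List.dropWhile_cons_of_pos h] at hl
      have h2 := List.length_dropWhile_le PySem.Chars.isspace t
      rw [hl] at h2
      simp at h2
  intro d hd
  simp only [List.head?_cons, Option.mem_def, Option.some.injEq] at hd
  subst hd
  exact hc

theorem pv_split0_one (p : List Char) (hl : p.dropWhile PySem.Chars.isspace = p) (hp : p ≠ []) :
    PySem.Chars.split₀Max p 1 =
      (if (p.dropWhile (fun c => !PySem.Chars.isspace c)).dropWhile PySem.Chars.isspace = [] then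
        [p.takeWhile (fun c => !PySem.Chars.isspace c)]
      else
        [p.takeWhile (fun c => !PySem.Chars.isspace c),
         (p.dropWhile (fun c => !PySem.Chars.isspace c)).dropWhile PySem.Chars.isspace]) := by
  obtain ⟨c, t, rfl⟩ := List.exists_cons_of_ne_nil hp
  unfold PySem.Chars.split₀Max
  rw [if_neg (by omega : ¬(1:Int) < 0)]
  rw [show Int.toNat 1 = 1 from rfl]
  show PySem.Chars.split₀Max.go ((c :: t).length + 1) 1 (c :: t) [] = _
  rw [show (c :: t).length + 1 = (t.length + 1) + 1 from by simp]
  rw [PySem.Chars.split₀Max.go.eq_def]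
  simp only [hl, if_neg (by omega : ¬(1:Nat) = 0)]
  rw [PySem.Chars.split₀Max.go.eq_def]
  cases hq : ((c :: t).dropWhile (fun c => !PySem.Chars.isspace c)).dropWhile PySem.Chars.isspace with
  | nil => simp [hq]
  | cons d q => simp [hq]

-- whitespace-prefix / -suffix bookkeeping for strip = rstrip ∘ lstrip
theorem pv_dropWhile_fix_iff (p : Char → Bool) (l : List Char) :
    l.dropWhile p = l ↔ ∀ c ∈ l.head?, p c = false := by
  cases l with
  | nil => simp
  | cons c t =>
    cases h : p c with
    | false =>
      have h' : ¬ p c = true := by simp [h]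
      rw [List.dropWhile_cons_of_neg h']
      simp [h]
    | true =>
      simp only [List.dropWhile_cons_of_pos h, List.head?_cons, Option.mem_def,
        Option.some.injEq]
      constructor
      · intro he
        have h2 := List.length_dropWhile_le p t
        rw [he] at h2
        simp at h2
      · intro he
        have := he c rfl
        rw [h] at this
        exact absurd this (by simp)

theorem pv_head?_of_prefix (s l : List Char) (h : s <+: l) (hs : s ≠ []) : s.head? = l.head? := by
  obtain ⟨r, rfl⟩ := h
  cases s with
  | nil => exact absurd rfl hs
  | cons c t => simp

theorem pv_lstrip_rstrip_comm (l : List Char) :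
    (PySem.Chars.rstrip l).dropWhile PySem.Chars.isspace =
      PySem.Chars.rstrip (l.dropWhile PySem.Chars.isspace) := by
  have hab : l.takeWhile PySem.Chars.isspace ++ l.dropWhile PySem.Chars.isspace = l :=
    List.takeWhile_append_dropWhile
  set a := l.takeWhile PySem.Chars.isspace with ha
  set b := l.dropWhile PySem.Chars.isspace with hb
  have haws : a.reverse.dropWhile PySem.Chars.isspace = [] := by
    rw [List.dropWhile_eq_nil_iff]
    intro x hx
    exact List.mem_takeWhile_imp (by simpa using hx)
  have hrl : PySem.Chars.rstrip l =
      if (b.reverse.dropWhile PySem.Chars.isspace).isEmpty then []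
      else a ++ PySem.Chars.rstrip b := by
    unfold PySem.Chars.rstrip
    rw [← hab, List.reverse_append, List.dropWhile_append]
    by_cases hbe : b.reverse.dropWhile PySem.Chars.isspace = []
    · rw [hbe, haws]
      simp
    · have hbf : (b.reverse.dropWhile PySem.Chars.isspace).isEmpty = false := by
        simp [hbe]
      rw [hbf]
      simp
  rw [hrl]
  by_cases hbe : b.reverse.dropWhile PySem.Chars.isspace = []
  · rw [hbe]
    have hrb0 : PySem.Chars.rstrip b = [] := by
      unfold PySem.Chars.rstrip
      rw [hbe]
      rfl
    simp [hrb0]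
  · rw [if_neg (by simp [hbe])]
    rw [List.dropWhile_append]
    have hade : a.dropWhile PySem.Chars.isspace = [] := by
      rw [List.dropWhile_eq_nil_iff]
      intro x hx
      exact List.mem_takeWhile_imp hx
    rw [hade]
    rw [if_pos (by simp : ([] : List Char).isEmpty = true)]
    have hrb : PySem.Chars.rstrip b ≠ [] := by
      unfold PySem.Chars.rstrip
      simp [hbe]
    rw [pv_dropWhile_fix_iff]
    intro c hc
    have hpre : PySem.Chars.rstrip b <+: b := by
      unfold PySem.Chars.rstrip
      have : b.reverse.dropWhile PySem.Chars.isspace <:+ b.reverse := List.dropWhile_suffix _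
      have := List.reverse_prefix.mpr this
      simpa using this
    rw [pv_head?_of_prefix _ b hpre hrb] at hc
    have hbfix : b.dropWhile PySem.Chars.isspace = b := by
      rw [hb, List.dropWhile_idempotent]
    exact (pv_dropWhile_fix_iff PySem.Chars.isspace b).mp hbfix c hc

theorem pv_strip_lstrip (cs : List Char) :
    (PySem.Chars.strip cs).dropWhile PySem.Chars.isspace = PySem.Chars.strip cs := by
  show (PySem.Chars.rstrip (PySem.Chars.lstrip cs)).dropWhile PySem.Chars.isspace = _
  rw [pv_lstrip_rstrip_comm]
  unfold PySem.Chars.lstrip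
  rw [List.dropWhile_idempotent]
  rfl

theorem pv_strip_length_le (cs : List Char) : (PySem.Chars.strip cs).length ≤ cs.length := by
  unfold PySem.Chars.strip PySem.Chars.rstrip PySem.Chars.lstrip
  have h1 := List.length_dropWhile_le PySem.Chars.isspace cs
  have h2 := List.length_dropWhile_le PySem.Chars.isspace (cs.dropWhile PySem.Chars.isspace).reverse
  simp at h2 ⊢
  omega

-- drop of a non-space-headed list is strictly shorter
theorem pv_drop_nonws_lt (p : List Char) (hl : p.dropWhile PySem.Chars.isspace = p) (hp : p ≠ []) :
    (p.dropWhile (fun c => !PySem.Chars.isspace c)).length < p.length := by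
  obtain ⟨c, t, rfl⟩ := List.exists_cons_of_ne_nil hp
  have hc := pv_head_not_space (c :: t) hl (by simp) c (by simp)
  rw [List.dropWhile_cons_of_pos (by simp [hc])]
  have := List.length_dropWhile_le (fun c => !PySem.Chars.isspace c) t
  simp; omega

-- ===== PORT A =====
-- A's loop over the shrinking remainder string (on List Char; tokens converted to String at the end).
def pvALoop (cs : List Char) : List (List Char) :=
  let p := PySem.Chars.strip cs
  if hp : p = [] then []
  else
    let a := if p.headD ' ' = '{' then PySem.Chars.splitOnMax p.tail ['}'] 1
             else PySem.Chars.split₀Max p 1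
    a.headD [] :: pvALoop (if a.length = 2 then a.getD 1 [] else [])
termination_by cs.length
decreasing_by
  have hple := pv_strip_length_le cs
  have hlfix := pv_strip_lstrip cs
  have h1 : 0 < (PySem.Chars.strip cs).length := List.length_pos_of_ne_nil hp
  by_cases hbr : (PySem.Chars.strip cs).headD ' ' = '{'
  · rw [dif_pos hbr, pv_splitOnMax_one]
    by_cases hd : (PySem.Chars.strip cs).tail.dropWhile (fun c => c != '}') = []
    · rw [if_pos hd]
      simp
      omega
    · rw [if_neg hd]
      have h2 := List.length_dropWhile_le (fun c => c != '}') (PySem.Chars.strip cs).tail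
      have h4 := List.length_tail (l := PySem.Chars.strip cs)
      simp
      omega
  · rw [dif_neg hbr, pv_split0_one _ hlfix hp]
    have h5 := pv_drop_nonws_lt _ hlfix hp
    by_cases hq : ((PySem.Chars.strip cs).dropWhile (fun c => !PySem.Chars.isspace c)).dropWhile PySem.Chars.isspace = []
    · rw [if_pos hq]
      simp
      omega
    · rw [if_neg hq]
      have h6 := List.length_dropWhile_le PySem.Chars.isspace ((PySem.Chars.strip cs).dropWhile (fun c => !PySem.Chars.isspace c))
      simp
      omega

def split_tk_file_list (pattern : String) : List String :=
  (pvALoop pattern.toList).map (fun t => String.ofList t)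

-- ===== PORT B =====
-- B's cursor scan, as recursion on the remaining suffix (the cursor's tail);
-- the initial rstrip is Source B's `p = pattern.rstrip()`.
def pvBScan (cs : List Char) : List (List Char) :=
  let t := cs.dropWhile PySem.Chars.isspace
  if ht : t = [] then []
  else if t.headD ' ' = '{' then
    let u := t.tail
    let r := u.dropWhile (fun c => c != '}')
    if r = [] then [u]
    else u.takeWhile (fun c => c != '}') :: pvBScan r.tail
  else
    t.takeWhile (fun c => !PySem.Chars.isspace c) ::
      pvBScan (t.dropWhile (fun c => !PySem.Chars.isspace c))
termination_by cs.length
decreasing_by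
  · have h1 := List.length_dropWhile_le PySem.Chars.isspace cs
    have h2 : 0 < (cs.dropWhile PySem.Chars.isspace).length := List.length_pos_of_ne_nil ht
    have h3 := List.length_dropWhile_le (fun c => c != '}') (cs.dropWhile PySem.Chars.isspace).tail
    have h4 := List.length_tail (l := cs.dropWhile PySem.Chars.isspace)
    have h5 := List.length_tail (l := (cs.dropWhile PySem.Chars.isspace).tail.dropWhile (fun c => c != '}'))
    omega
  · have h1 := List.length_dropWhile_le PySem.Chars.isspace cs
    have h2 := pv_drop_nonws_lt (cs.dropWhile PySem.Chars.isspace)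
      (List.dropWhile_idempotent _ _) ht
    omega

def split_tk_file_list_alt (pattern : String) : List String :=
  (pvBScan (PySem.Chars.rstrip pattern.toList)).map (fun t => String.ofList t)

-- ===== PRECONDITION & SPEC =====
def Spec_split_tk_file_list (pattern : String) (out : List String) : Prop := out = split_tk_file_list_alt pattern
instance (pattern : String) (out : List String) : Decidable (Spec_split_tk_file_list pattern out) := by unfold Spec_split_tk_file_list; infer_instance

-- ===== CLAIM (what is proved, stated in full; the proofs are below) =====
def Claim_equal_split_tk_file_list : Prop := ∀ (pattern : String), Dom_split_tk_file_list pattern → Spec_split_tk_file_list pattern (split_tk_file_list pattern)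

-- ===== LEMMAS AND PROOFS =====

theorem pv_lstrip_fix_of_prefix (s l : List Char) (h : s <+: l)
    (hl : l.dropWhile PySem.Chars.isspace = l) : s.dropWhile PySem.Chars.isspace = s := by
  rcases eq_or_ne s [] with rfl | hs
  · simp
  · rw [pv_dropWhile_fix_iff] at hl ⊢
    rw [pv_head?_of_prefix s l h hs]
    exact hl

theorem pv_rstrip_fix_of_suffix (s l : List Char) (h : s <:+ l)
    (hl : PySem.Chars.rstrip l = l) : PySem.Chars.rstrip s = s := by
  unfold PySem.Chars.rstrip at hl ⊢
  have hl' : l.reverse.dropWhile PySem.Chars.isspace = l.reverse := by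
    have := congrArg List.reverse hl
    simpa using this
  have hs' := pv_lstrip_fix_of_prefix s.reverse l.reverse (List.reverse_prefix.mpr h) hl'
  rw [hs']
  simp

theorem pv_rstrip_idem (l : List Char) : PySem.Chars.rstrip (PySem.Chars.rstrip l) = PySem.Chars.rstrip l := by
  unfold PySem.Chars.rstrip
  simp [List.dropWhile_idempotent]

theorem pv_rstrip_strip (cs : List Char) :
    PySem.Chars.rstrip (PySem.Chars.strip cs) = PySem.Chars.strip cs := pv_rstrip_idem _


theorem pvALoop_nil : pvALoop [] = [] := by
  rw [pvALoop.eq_def]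
  rfl

theorem pvBScan_nil : pvBScan [] = [] := by
  rw [pvBScan.eq_def]
  rfl

theorem pvBScan_lstrip (x : List Char) :
    pvBScan (x.dropWhile PySem.Chars.isspace) = pvBScan x := by
  rw [pvBScan.eq_def, pvBScan.eq_def, List.dropWhile_idempotent]

theorem pv_main : ∀ (n : Nat) (cs : List Char), cs.length ≤ n →
    pvALoop cs = pvBScan (PySem.Chars.rstrip cs) := by
  intro n
  induction n with
  | zero =>
    intro cs h
    have hnil : cs = [] := List.eq_nil_of_length_eq_zero (by omega)
    subst hnil
    show pvALoop [] = pvBScan (PySem.Chars.rstrip [])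
    rw [show PySem.Chars.rstrip [] = [] from rfl, pvALoop_nil, pvBScan_nil]
  | succ n ih =>
    intro cs hlen
    rw [pvALoop.eq_def, pvBScan.eq_def]
    have hBt : (PySem.Chars.rstrip cs).dropWhile PySem.Chars.isspace = PySem.Chars.strip cs := by
      rw [pv_lstrip_rstrip_comm]
      rfl
    rw [hBt]
    have hrp : PySem.Chars.rstrip (PySem.Chars.strip cs) = PySem.Chars.strip cs := pv_rstrip_strip cs
    have hlfix := pv_strip_lstrip cs
    have hple := pv_strip_length_le cs
    by_cases hp : PySem.Chars.strip cs = []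
    · simp [hp]
    · have h1 : 0 < (PySem.Chars.strip cs).length := List.length_pos_of_ne_nil hp
      by_cases hbr : (PySem.Chars.strip cs).head?.getD ' ' = '{'
      · by_cases hd : (PySem.Chars.strip cs).tail.dropWhile (fun c => c != '}') = []
        · simp [hp, hbr, hd, pv_splitOnMax_one, pvALoop_nil]
        · have hsuf : ((PySem.Chars.strip cs).tail.dropWhile (fun c => c != '}')).tail <:+ PySem.Chars.strip cs :=
            (List.tail_suffix _).trans ((List.dropWhile_suffix _).trans (List.tail_suffix _))
          have hfix := pv_rstrip_fix_of_suffix _ _ hsuf hrp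
          have hlen2 : ((PySem.Chars.strip cs).tail.dropWhile (fun c => c != '}')).tail.length ≤ n := by
            have h2 := List.length_dropWhile_le (fun c => c != '}') (PySem.Chars.strip cs).tail
            have h4 := List.length_tail (l := PySem.Chars.strip cs)
            have h5 := List.length_tail (l := (PySem.Chars.strip cs).tail.dropWhile (fun c => c != '}'))
            omega
          have hih : pvALoop ((PySem.Chars.strip cs).tail.dropWhile (fun c => c != '}')).tail =
              pvBScan ((PySem.Chars.strip cs).tail.dropWhile (fun c => c != '}')).tail := by
            rw [ih _ hlen2, hfix]
          simp [hp, hbr, hd, pv_splitOnMax_one, hih]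
      · by_cases hq : ((PySem.Chars.strip cs).dropWhile (fun c => !PySem.Chars.isspace c)).dropWhile PySem.Chars.isspace = []
        · have hB0 : pvBScan ((PySem.Chars.strip cs).dropWhile (fun c => !PySem.Chars.isspace c)) = [] := by
            rw [pvBScan.eq_def]
            simp [hq]
          simp [hp, hbr, hq, pv_split0_one _ hlfix hp, pvALoop_nil, hB0]
        · have hsuf : ((PySem.Chars.strip cs).dropWhile (fun c => !PySem.Chars.isspace c)).dropWhile PySem.Chars.isspace <:+ PySem.Chars.strip cs :=
            (List.dropWhile_suffix _).trans (List.dropWhile_suffix _)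
          have hfix := pv_rstrip_fix_of_suffix _ _ hsuf hrp
          have hlen2 : (((PySem.Chars.strip cs).dropWhile (fun c => !PySem.Chars.isspace c)).dropWhile PySem.Chars.isspace).length ≤ n := by
            have h5 := pv_drop_nonws_lt _ hlfix hp
            have h6 := List.length_dropWhile_le PySem.Chars.isspace ((PySem.Chars.strip cs).dropWhile (fun c => !PySem.Chars.isspace c))
            omega
          have hih : pvALoop (((PySem.Chars.strip cs).dropWhile (fun c => !PySem.Chars.isspace c)).dropWhile PySem.Chars.isspace) =
              pvBScan ((PySem.Chars.strip cs).dropWhile (fun c => !PySem.Chars.isspace c)) := by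
            rw [ih _ hlen2, hfix, pvBScan_lstrip]
          simp [hp, hbr, hq, pv_split0_one _ hlfix hp, hih]

-- ===== VERDICT (by name: the statement is the Claim_ definition above) =====
theorem split_tk_file_list_spec : Claim_equal_split_tk_file_list := by
  intro pattern _
  unfold Spec_split_tk_file_list split_tk_file_list split_tk_file_list_alt
  rw [pv_main pattern.toList.length pattern.toList le_rfl]
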